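-- pv_equiv track=rewrite | github.com/Helios113/dyna | src/dyna/tests/test_utils.py | get_sequence_boundaries
-- ===== SOURCE A (Python) =====
-- from typing import List, Tuple
--
-- def get_sequence_boundaries(eos_positions: List[int], max_length: int) -> List[Tuple[int, int]]:
--     """
--     Get start and end positions for each sequence based on EOS positions.
--     """
--     boundaries = []
--     start = 0
--
--     for eos_pos in eos_positions:
--         boundaries.append((start, eos_pos))
--         start = eos_pos + 1
--
--     if start < max_length:
--         boundaries.append((start, max_length - 1))
--
--     return boundaries
-- ===== SOURCE B (Python) =====
-- from typing import List, Tuple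
--
-- def get_sequence_boundaries(eos_positions: List[int], max_length: int) -> List[Tuple[int, int]]:
--     out = []
--     # build back-to-front: decide the trailing open segment first
--     last_start = eos_positions[-1] + 1 if eos_positions else 0
--     if last_start < max_length:
--         out.append((last_start, max_length - 1))
--     # walk the EOS list right-to-left; each segment's start is read from its predecessor
--     for i in range(len(eos_positions) - 1, -1, -1):
--         start = eos_positions[i - 1] + 1 if i > 0 else 0
--         out.append((start, eos_positions[i]))
--     out.reverse()
--     return out
-- ===== Notes on version B (the rewrite author's own statement) =====
-- stated objective: alternative
-- what changed: Replaces A's forward loop that threads a running 'start' accumulator and appends segments in order (deciding the trailing segment last) by a back-to-front construction: the trailing open segment is decided first, then the EOS list is walked right-to-left by index with each segment's start read from its predecessor element, and the collected list is reversed at the end; no running accumulator is threaded.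
import Mathlib
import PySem

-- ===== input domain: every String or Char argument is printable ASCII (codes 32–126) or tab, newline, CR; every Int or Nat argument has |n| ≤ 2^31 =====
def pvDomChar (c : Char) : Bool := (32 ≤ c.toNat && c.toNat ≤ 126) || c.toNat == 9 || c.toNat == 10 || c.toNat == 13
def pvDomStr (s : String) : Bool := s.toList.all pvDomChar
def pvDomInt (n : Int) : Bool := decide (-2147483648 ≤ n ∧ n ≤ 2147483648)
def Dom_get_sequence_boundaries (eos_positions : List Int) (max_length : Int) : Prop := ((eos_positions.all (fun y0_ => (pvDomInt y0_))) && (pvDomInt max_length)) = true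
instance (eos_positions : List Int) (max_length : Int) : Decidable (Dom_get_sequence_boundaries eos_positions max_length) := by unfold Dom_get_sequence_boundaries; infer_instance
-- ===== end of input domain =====

-- B builds the boundary list back-to-front (trailing segment first, then a right-to-left indexed walk reading each start from the predecessor, reversed at the end) instead of A's forward loop threading a running start (alternative decomposition, same cost).


-- ===== PORT A =====
-- loop: boundaries.append((start, eos_pos)); start = eos_pos + 1; then trailing-segment guard
def get_sequence_boundaries (eos_positions : List Int) (max_length : Int) : List (Int × Int) :=
  let st := eos_positions.foldl
    (fun (st : List (Int × Int) × Int) eos_pos => (st.1 ++ [(st.2, eos_pos)], eos_pos + 1))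
    ([], 0)
  if st.2 < max_length then st.1 ++ [(st.2, max_length - 1)] else st.1

-- ===== PORT B =====
-- back-to-front: trailing segment first, then range(len-1, -1, -1) reading eos[i] and eos[i-1];
-- all indices are in range (i ∈ [0, len), i-1 read only when i > 0, [-1] only when nonempty),
-- so pyGetD with default 0 is exact here
def get_sequence_boundaries_alt (eos_positions : List Int) (max_length : Int) : List (Int × Int) :=
  let last_start : Int :=
    if eos_positions.isEmpty then 0 else PySem.List.pyGetD eos_positions (-1) 0 + 1
  let out1 : List (Int × Int) :=
    if last_start < max_length then [(last_start, max_length - 1)] else []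
  let out2 := (PySem.List.pyRange ((eos_positions.length : Int) - 1) (-1) (-1)).foldl
    (fun out i =>
      out ++ [((if i > 0 then PySem.List.pyGetD eos_positions (i - 1) 0 + 1 else 0),
               PySem.List.pyGetD eos_positions i 0)]) out1
  out2.reverse

-- ===== PRECONDITION & SPEC =====
def Spec_get_sequence_boundaries (eos_positions : List Int) (max_length : Int) (out : List (Int × Int)) : Prop := out = get_sequence_boundaries_alt eos_positions max_length
instance (eos_positions : List Int) (max_length : Int) (out : List (Int × Int)) : Decidable (Spec_get_sequence_boundaries eos_positions max_length out) := by unfold Spec_get_sequence_boundaries; infer_instance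

-- ===== CLAIM (what is proved, stated in full; the proofs are below) =====
def Claim_equal_get_sequence_boundaries : Prop := ∀ (eos_positions : List Int) (max_length : Int), Dom_get_sequence_boundaries eos_positions max_length → Spec_get_sequence_boundaries eos_positions max_length (get_sequence_boundaries eos_positions max_length)

-- ===== LEMMAS AND PROOFS =====

-- proof-side middle form: the segment list as a primitive recursion with a running start
def gsbGo (m : Int) (s : Int) : List Int → List (Int × Int)
  | [] => if s < m then [(s, m - 1)] else []
  | e :: rest => (s, e) :: gsbGo m (e + 1) rest

-- the per-index pair B emits, with the i = 0 start generalised to s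
def gsbF (eos : List Int) (s : Int) (i : Int) : Int × Int :=
  (if i > 0 then PySem.List.pyGetD eos (i - 1) 0 + 1 else s, PySem.List.pyGetD eos i 0)

-- the trailing segment B emits, with the empty-list start generalised to s
def gsbT (eos : List Int) (s m : Int) : List (Int × Int) :=
  if (if eos.isEmpty then s else PySem.List.pyGetD eos (-1) 0 + 1) < m
  then [((if eos.isEmpty then s else PySem.List.pyGetD eos (-1) 0 + 1), m - 1)] else []

-- A's loop + guard, generalised over accumulator and running start, equals gsbGo
theorem gsb_loop_eq (eos : List Int) (m : Int) : ∀ (acc : List (Int × Int)) (s : Int),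
    (let st := eos.foldl
        (fun (st : List (Int × Int) × Int) e => (st.1 ++ [(st.2, e)], e + 1)) (acc, s)
     if st.2 < m then st.1 ++ [(st.2, m - 1)] else st.1)
    = acc ++ gsbGo m s eos := by
  induction eos with
  | nil => intro acc s; by_cases h : s < m <;> simp [gsbGo, h]
  | cons e rest ih =>
    intro acc s
    simp only [List.foldl_cons]
    rw [ih (acc ++ [(s, e)]) (e + 1)]
    simp [gsbGo]

theorem pyGetD_cons_shift (x : Int) (xs : List Int) (j : ℕ) :
    PySem.List.pyGetD (x :: xs) ((j : Int) + 1) 0 = PySem.List.pyGetD xs (j : Int) 0 := by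
  have hc : ((j : Int) + 1) = ((j + 1 : ℕ) : Int) := by push_cast; ring
  rw [hc, PySem.List.pyGetD_natCast, PySem.List.pyGetD_natCast]
  simp

theorem gsbF_shift (e : Int) (rest : List Int) (s : Int) (k : ℕ) :
    gsbF (e :: rest) s ((k : Int) + 1) = gsbF rest (e + 1) (k : Int) := by
  unfold gsbF
  simp only [Prod.mk.injEq]
  refine ⟨?_, pyGetD_cons_shift e rest k⟩
  rw [if_pos (by positivity : (0 : Int) < (k : Int) + 1)]
  rw [show (k : Int) + 1 - 1 = (k : Int) by ring]
  cases k with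
  | zero =>
    rw [if_neg (by simp)]
    simp [PySem.List.pyGetD_zero_cons]
  | succ k' =>
    rw [if_pos (by exact_mod_cast Nat.succ_pos k')]
    rw [show ((k' + 1 : ℕ) : Int) = (k' : Int) + 1 by push_cast; ring]
    rw [pyGetD_cons_shift e rest k']
    rw [show (k' : Int) + 1 - 1 = (k' : Int) by ring]

theorem gsbT_shift (e : Int) (rest : List Int) (s m : Int) :
    gsbT (e :: rest) s m = gsbT rest (e + 1) m := by
  unfold gsbT
  cases rest with
  | nil =>
    rw [PySem.List.pyGetD_neg_one (e :: []) 0 (by simp)]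
    simp
  | cons r rs =>
    rw [PySem.List.pyGetD_neg_one (e :: r :: rs) 0 (by simp),
        PySem.List.pyGetD_neg_one (r :: rs) 0 (by simp)]
    simp [List.getLast_cons]

-- the forward map over indices plus the trailing segment equals gsbGo
theorem gsb_map_eq (m : Int) : ∀ (eos : List Int) (s : Int),
    (List.range eos.length).map (fun (k : ℕ) => gsbF eos s (k : Int)) ++ gsbT eos s m
      = gsbGo m s eos := by
  intro eos
  induction eos with
  | nil => intro s; simp [gsbT, gsbGo]
  | cons e rest ih =>
    intro s
    rw [List.length_cons, List.range_succ_eq_map, List.map_cons, List.map_map,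
        List.cons_append]
    have hmap : (List.range rest.length).map
          ((fun k : ℕ => gsbF (e :: rest) s (k : Int)) ∘ Nat.succ)
        = (List.range rest.length).map (fun k : ℕ => gsbF rest (e + 1) (k : Int)) := by
      apply List.map_congr_left
      intro k _
      show gsbF (e :: rest) s ((k + 1 : ℕ) : Int) = gsbF rest (e + 1) (k : Int)
      rw [show ((k + 1 : ℕ) : Int) = (k : Int) + 1 by push_cast; ring, gsbF_shift]
    rw [gsbT_shift, hmap, ih (e + 1)]
    simp [gsbGo, gsbF, PySem.List.pyGetD_zero_cons]

-- B unfolds to that forward map plus trailing segment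
theorem gsb_alt_eq (eos : List Int) (m : Int) :
    get_sequence_boundaries_alt eos m
      = (List.range eos.length).map (fun (k : ℕ) => gsbF eos 0 (k : Int)) ++ gsbT eos 0 m := by
  unfold get_sequence_boundaries_alt
  rw [PySem.List.pyRange_neg_one_eq_reverse]
  rw [show (-1 : Int) + 1 = 0 by ring,
      show ((eos.length : Int) - 1) + 1 = (eos.length : Int) by ring]
  rw [PySem.List.pyRange_zero_nat]
  show (List.foldl
        (fun out i => out ++ [((if i > 0 then PySem.List.pyGetD eos (i - 1) 0 + 1 else 0),
               PySem.List.pyGetD eos i 0)])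
        (if (if eos.isEmpty then 0 else PySem.List.pyGetD eos (-1) 0 + 1) < m
         then [((if eos.isEmpty then 0 else PySem.List.pyGetD eos (-1) 0 + 1), m - 1)] else [])
        ((List.map (fun k : ℕ => (k : Int)) (List.range eos.length)).reverse)).reverse
    = List.map (fun k : ℕ => gsbF eos 0 (k : Int)) (List.range eos.length) ++ gsbT eos 0 m
  rw [PySem.List.foldl_append_singleton_eq_map
        (fun i => ((if i > 0 then PySem.List.pyGetD eos (i - 1) 0 + 1 else 0),
                    PySem.List.pyGetD eos i 0))]
  rw [List.reverse_append, List.map_reverse, List.reverse_reverse, List.map_map]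
  congr 1
  unfold gsbT
  split_ifs <;> simp

-- ===== VERDICT (by name: the statement is the Claim_ definition above) =====
theorem get_sequence_boundaries_spec : Claim_equal_get_sequence_boundaries := by
  intro eos m _
  unfold Spec_get_sequence_boundaries
  rw [gsb_alt_eq, gsb_map_eq]
  unfold get_sequence_boundaries
  simpa using gsb_loop_eq eos m [] 0
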